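-- pv_equiv track=rewrite | github.com/VIZQL/PythonProject | KakaoAPI/New_bot.py | find_linecnt_until_user
-- ===== SOURCE A (Python) =====
-- def find_linecnt_until_user(data, cur_index, line_cnt):
--     total_len = len(data)
--
--     if(total_len >= -cur_index+3):
--
--         if(data[cur_index-1].split(" ")[0] != data[cur_index-3].split(" ")[0]):
--             final_index =  cur_index
--         else:
--             line_cnt = line_cnt + data[cur_index-2].count("\n")
--             final_index, line_cnt = find_linecnt_until_user(data, cur_index-2, line_cnt)
--     else:
--         final_index = cur_index
--
--     return final_index, line_cnt
-- ===== SOURCE B (Python) =====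
-- def find_linecnt_until_user(data, cur_index, line_cnt):
--     # Phase 1: walk backward to find the boundary index (no counting).
--     n = len(data)
--     i = cur_index
--     while n >= 3 - i and data[i - 1].split(" ")[0] == data[i - 3].split(" ")[0]:
--         i -= 2
--     # Phase 2: sum the newlines of the message entries that were skipped over.
--     extra = sum(data[j].count("\n") for j in range(i, cur_index, 2))
--     return i, line_cnt + extra
-- ===== Notes on version B (the rewrite author's own statement) =====
-- stated objective: alternative
-- what changed: Replaces the tail recursion that threads the newline count through every call by a two-phase iterative version: an explicit while loop first finds the boundary index alone, then a single range-based sum collects the newline counts of the skipped entries.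
import Mathlib
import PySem

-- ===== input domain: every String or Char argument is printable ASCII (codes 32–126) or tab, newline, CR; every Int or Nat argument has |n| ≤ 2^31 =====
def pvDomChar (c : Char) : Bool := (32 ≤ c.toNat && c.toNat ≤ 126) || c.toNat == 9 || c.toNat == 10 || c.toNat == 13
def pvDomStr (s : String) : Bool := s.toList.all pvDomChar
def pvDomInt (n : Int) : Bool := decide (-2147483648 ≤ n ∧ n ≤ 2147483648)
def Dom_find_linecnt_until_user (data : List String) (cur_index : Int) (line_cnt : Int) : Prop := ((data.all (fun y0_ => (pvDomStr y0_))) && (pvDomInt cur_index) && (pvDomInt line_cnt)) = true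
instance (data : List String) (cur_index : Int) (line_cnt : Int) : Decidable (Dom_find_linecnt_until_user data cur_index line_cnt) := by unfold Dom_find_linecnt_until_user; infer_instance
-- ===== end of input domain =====

-- B replaces A's counting tail recursion by a two-phase version: a plain backward scan that
-- only finds the boundary index, then one range-sum of the newline counts of the skipped entries.


-- ===== PORT A =====
def find_linecnt_until_user (data : List String) (cur_index : Int) (line_cnt : Int) : Int × Int :=
  if h : (data.length : Int) ≥ -cur_index + 3 then
    match PySem.List.pyGet? data (cur_index - 1), PySem.List.pyGet? data (cur_index - 3) with
    | some s1, some s3 =>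
      if ((PySem.Str.split? s1 " ").getD []).headD "" ≠ ((PySem.Str.split? s3 " ").getD []).headD "" then
        (cur_index, line_cnt)
      else
        find_linecnt_until_user data (cur_index - 2)
          (line_cnt + ((PySem.Str.count ((PySem.List.pyGet? data (cur_index - 2)).getD "") "\n" : Nat) : Int))
    | _, _ => (cur_index, line_cnt)   -- Python raises IndexError here; excluded by Pre_
  else (cur_index, line_cnt)
termination_by (data.length + cur_index).toNat
decreasing_by omega

-- ===== PORT B =====
-- first word of data[j] (data[j] out of range never reached inside Pre_; Python raises there)
def pvTok (data : List String) (j : Int) : String :=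
  ((PySem.Str.split? ((PySem.List.pyGet? data j).getD "") " ").getD []).headD ""

-- the while loop of Source B: walk backward while the sender repeats
def pvScanBack (data : List String) (n : Int) (i : Int) : Int :=
  if h : 3 - i ≤ n ∧ pvTok data (i - 1) = pvTok data (i - 3) then
    pvScanBack data n (i - 2)
  else i
termination_by (n + i).toNat
decreasing_by have := h.1; omega

def find_linecnt_until_user_alt (data : List String) (cur_index : Int) (line_cnt : Int) : Int × Int :=
  let n : Int := data.length
  let i := pvScanBack data n cur_index
  let extra := (PySem.List.pyRange i cur_index 2).foldl
    (fun acc j => acc + ((PySem.Str.count ((PySem.List.pyGet? data j).getD "") "\n" : Nat) : Int)) 0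
  (i, line_cnt + extra)

-- ===== PRECONDITION & SPEC =====
-- Exactly the inputs where Python A returns: either the whole backward walk stays in range
-- (cur_index ≤ len(data)), or the very first bounds guard already fails; otherwise A raises IndexError.
def Pre_find_linecnt_until_user (data : List String) (cur_index : Int) (line_cnt : Int) : Prop :=
  cur_index ≤ (data.length : Int) ∨ (data.length : Int) < 3 - cur_index
instance (data : List String) (cur_index : Int) (line_cnt : Int) : Decidable (Pre_find_linecnt_until_user data cur_index line_cnt) := by unfold Pre_find_linecnt_until_user; infer_instance

def pvWitness_find_linecnt_until_user : List String × Int × Int := (["u1 hi", "a\nb", "u1 yo"], -1, 0)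

def Spec_find_linecnt_until_user (data : List String) (cur_index : Int) (line_cnt : Int) (out : Int × Int) : Prop := out = find_linecnt_until_user_alt data cur_index line_cnt
instance (data : List String) (cur_index : Int) (line_cnt : Int) (out : Int × Int) : Decidable (Spec_find_linecnt_until_user data cur_index line_cnt out) := by unfold Spec_find_linecnt_until_user; infer_instance

-- ===== CLAIM (what is proved, stated in full; the proofs are below) =====
def Claim_equal_find_linecnt_until_user : Prop := ∀ (data : List String) (cur_index : Int) (line_cnt : Int), Dom_find_linecnt_until_user data cur_index line_cnt → Pre_find_linecnt_until_user data cur_index line_cnt → Spec_find_linecnt_until_user data cur_index line_cnt (find_linecnt_until_user data cur_index line_cnt)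

-- ===== LEMMAS AND PROOFS =====

lemma pvScanBack_sub (data : List String) (n i : Int) :
    ∃ t : Nat, pvScanBack data n i = i - 2 * t := by
  fun_induction pvScanBack data n i with
  | case1 i h ih => obtain ⟨t, ht⟩ := ih; exact ⟨t + 1, by rw [ht]; push_cast; ring⟩
  | case2 i h => exact ⟨0, by simp⟩

lemma pyRange_two_snoc (a b : Int) (h1 : a ≤ b - 2) (h2 : (2:Int) ∣ b - a) :
    PySem.List.pyRange a b 2 = PySem.List.pyRange a (b - 2) 2 ++ [b - 2] := by
  obtain ⟨t, ht⟩ := h2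
  have ht1 : 1 ≤ t := by omega
  rw [PySem.List.pyRange_of_pos _ _ (by norm_num : (0:Int) < 2),
      PySem.List.pyRange_of_pos _ _ (by norm_num : (0:Int) < 2)]
  have hc1 : (if a < b then ((b - a + 2 - 1) / 2).toNat else 0) = t.toNat := by
    rw [if_pos (by omega)]; omega
  have hc2 : (if a < b - 2 then ((b - 2 - a + 2 - 1) / 2).toNat else 0) = t.toNat - 1 := by
    by_cases hab : a < b - 2
    · rw [if_pos hab]; omega
    · rw [if_neg hab]; omega
  rw [hc1, hc2]
  have hs : t.toNat = (t.toNat - 1) + 1 := by omega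
  rw [hs, List.range_succ, List.map_append]
  simp only [List.map_cons, List.map_nil]
  congr 2
  omega

lemma pyRange_two_self (a : Int) : PySem.List.pyRange a a 2 = [] := by
  rw [PySem.List.pyRange_of_pos _ _ (by norm_num : (0:Int) < 2)]
  simp

lemma find_eq_alt (data : List String) (cur_index line_cnt : Int)
    (hp : Pre_find_linecnt_until_user data cur_index line_cnt) :
    find_linecnt_until_user data cur_index line_cnt = find_linecnt_until_user_alt data cur_index line_cnt := by
  revert hp
  fun_induction find_linecnt_until_user data cur_index line_cnt with
  | case1 ci lc h s1 s3 hg1 hg3 hne =>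
    intro hp
    have hs : pvScanBack data (data.length : Int) ci = ci := by
      rw [pvScanBack, dif_neg]
      intro ⟨_, hteq⟩
      exact hne (by simpa [pvTok, hg1, hg3] using hteq)
    simp [find_linecnt_until_user_alt, hs, pyRange_two_self]
  | case2 ci lc h s1 s3 hg1 hg3 hne ih =>
    intro hp
    have hn : ci ≤ (data.length : Int) := by
      rcases hp with hl | hr
      · exact hl
      · omega
    have hp' : Pre_find_linecnt_until_user data (ci - 2)
        (lc + ((PySem.Str.count ((PySem.List.pyGet? data (ci - 2)).getD "") "\n" : Nat) : Int)) := by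
      left; omega
    rw [ih hp']
    have heq : pvTok data (ci - 1) = pvTok data (ci - 3) := by
      simp only [pvTok, hg1, hg3, Option.getD_some]
      exact not_ne_iff.mp hne
    have hscan : pvScanBack data (data.length : Int) ci = pvScanBack data (data.length : Int) (ci - 2) := by
      rw [pvScanBack, dif_pos ⟨by omega, heq⟩]
    obtain ⟨t, ht⟩ := pvScanBack_sub data (data.length : Int) (ci - 2)
    have hsplit := pyRange_two_snoc (pvScanBack data (data.length : Int) (ci - 2)) ci
      (by omega) ⟨(t : Int) + 1, by omega⟩
    simp only [find_linecnt_until_user_alt, hscan]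
    rw [hsplit]
    rw [PySem.List.foldl_add, PySem.List.foldl_add]
    simp only [List.map_append, List.sum_append, List.map_cons, List.map_nil, List.sum_cons,
      List.sum_nil]
    refine Prod.ext rfl ?_
    simp
    ring
  | case3 ci lc h hno =>
    intro hp
    have hn : ci ≤ (data.length : Int) := by
      rcases hp with hl | hr
      · exact hl
      · omega
    have h1 : PySem.List.pyGet? data (ci - 1) ≠ none := by
      intro hc
      rw [PySem.List.pyGet?_eq_none_iff, PySem.Raise.InRange] at hc
      push Not at hc
      omega
    have h3 : PySem.List.pyGet? data (ci - 3) ≠ none := by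
      intro hc
      rw [PySem.List.pyGet?_eq_none_iff, PySem.Raise.InRange] at hc
      push Not at hc
      omega
    rcases ho1 : PySem.List.pyGet? data (ci - 1) with _ | s1
    · exact absurd ho1 h1
    rcases ho3 : PySem.List.pyGet? data (ci - 3) with _ | s3
    · exact absurd ho3 h3
    exact absurd (hno s1 s3 ho1 ho3) not_false
  | case4 ci lc h =>
    intro hp
    have hs : pvScanBack data (data.length : Int) ci = ci := by
      rw [pvScanBack, dif_neg]
      intro ⟨hb, _⟩
      omega
    simp [find_linecnt_until_user_alt, hs, pyRange_two_self]

-- ===== VERDICT (by name: the statement is the Claim_ definition above) =====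
theorem find_linecnt_until_user_spec : Claim_equal_find_linecnt_until_user := by
  intro data cur_index line_cnt _ hp
  exact find_eq_alt data cur_index line_cnt hp
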